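-- pv_equiv track=rewrite | github.com/KyungEunYou/mkm_model | mkm/utils.py | _free_site_regulator_for_mkm
-- ===== SOURCE A (Python) =====
-- from collections import Counter
--
-- def _free_site_regulator_for_mkm(left, right, ads_info:dict):
--
--     ads_info.update({"*":1})
--     right_sites = sum(ads_info[i] for i in right if i.endswith("*"))
--     lift_sites = sum(ads_info[i] for i in left if i.endswith("*"))
--
--     redundant_free_sites = right_sites - lift_sites
--     if redundant_free_sites < 0:
--         right += ["*"]*abs(redundant_free_sites)
--     elif redundant_free_sites > 0:
--         left += ["*"]*abs(redundant_free_sites)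
--     while "*" in left and "*" in right:
--         right.remove("*")
--         left.remove("*")
--     right = dict(Counter(right))
--     left = dict(Counter(left))
--     return left, right
-- ===== SOURCE B (Python) =====
-- def _free_site_regulator_for_mkm(left, right, ads_info: dict):
--     ads_info.update({"*": 1})
--     lift_sites = sum(ads_info[t] for t in left if t.endswith("*"))
--     right_sites = sum(ads_info[t] for t in right if t.endswith("*"))
--     surplus = right_sites - lift_sites
--     left_extra = max(surplus, 0)
--     right_extra = max(-surplus, 0)
--     removals = min(left.count("*") + left_extra, right.count("*") + right_extra)
--     return (_tally(left, left_extra, removals),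
--             _tally(right, right_extra, removals))
--
--
-- def _tally(tokens, extra, skip):
--     counts = {}
--     skipped = 0
--     for t in tokens:
--         if t == "*" and skipped < skip:
--             skipped += 1
--         else:
--             counts[t] = counts.get(t, 0) + 1
--     kept = extra - (skip - skipped)
--     if kept > 0:
--         counts["*"] = counts.get("*", 0) + kept
--     return counts
-- ===== Notes on version B (the rewrite author's own statement) =====
-- stated objective: alternative
-- what changed: Replaces the materialised ['*']*|surplus| padding plus the repeated list.remove('*') loop by computing the number of star removals arithmetically (min of the two star totals) and doing one counting pass per list that skips that many '*' tokens and adds the surviving padding count directly.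
import Mathlib
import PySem

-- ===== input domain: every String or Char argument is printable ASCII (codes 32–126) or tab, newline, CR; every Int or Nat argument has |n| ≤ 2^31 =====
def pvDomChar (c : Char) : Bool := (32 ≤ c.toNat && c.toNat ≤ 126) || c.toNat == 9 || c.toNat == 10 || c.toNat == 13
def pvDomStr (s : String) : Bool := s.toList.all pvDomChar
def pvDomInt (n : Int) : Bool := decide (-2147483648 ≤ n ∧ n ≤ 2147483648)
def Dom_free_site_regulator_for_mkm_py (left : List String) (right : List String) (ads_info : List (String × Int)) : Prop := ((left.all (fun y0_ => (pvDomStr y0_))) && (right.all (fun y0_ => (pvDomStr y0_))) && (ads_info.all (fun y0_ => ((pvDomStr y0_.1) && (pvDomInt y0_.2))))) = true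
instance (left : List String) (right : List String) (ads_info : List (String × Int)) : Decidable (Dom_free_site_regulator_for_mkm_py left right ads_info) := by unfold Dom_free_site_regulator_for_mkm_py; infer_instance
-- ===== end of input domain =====

-- B replaces A's materialised '*'-padding and repeated list.remove('*') loop by an arithmetic
-- removal count and one counting pass per list (objective: alternative).
-- A mutates its arguments (extends left/right, removes from them, adds "*" to ads_info); the
-- equivalence proved here is about the RETURN value only.

-- ===== PORT A =====
-- the 'while "*" in left and "*" in right: right.remove("*"); left.remove("*")' loop
def pvStarLoopA (l r : List String) : List String × List String :=
  if h : "*" ∈ l ∧ "*" ∈ r then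
    pvStarLoopA ((PySem.List.remove? l "*").getD l) ((PySem.List.remove? r "*").getD r)
  else (l, r)
termination_by r.length
decreasing_by
  rw [PySem.List.remove?_eq_some_erase r "*" h.2]
  have h1 := List.length_erase_of_mem h.2
  have h2 := List.length_pos_of_mem h.2
  simp only [Option.getD_some]
  omega

def free_site_regulator_for_mkm_py (left : List String) (right : List String) (ads_info : List (String × Int)) : (List (String × Int)) × (List (String × Int)) :=
  let ads := (PySem.Dict.ofList ads_info).insert "*" 1
  -- sum(ads_info[i] for i in … if i.endswith("*")); under Pre_ every lookup hits, so getD 0 is exact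
  let right_sites := ((right.filter (fun i => PySem.Str.endswith i "*")).map (fun i => ads.getD i 0)).sum
  let lift_sites := ((left.filter (fun i => PySem.Str.endswith i "*")).map (fun i => ads.getD i 0)).sum
  let red := right_sites - lift_sites
  let right1 := if red < 0 then right ++ PySem.List.pyRepeat ["*"] (-red) else right
  let left1 := if red < 0 then left else if red > 0 then left ++ PySem.List.pyRepeat ["*"] red else left
  let p := pvStarLoopA left1 right1
  ((PySem.Dict.counter p.1).items, (PySem.Dict.counter p.2).items)

-- ===== PORT B =====
-- one counting pass that skips the first `skip` "*" tokens and counts the surviving padding arithmetically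
def pvTallyB (tokens : List String) (extra : Int) (skip : Int) : List (String × Int) :=
  let st := tokens.foldl
    (fun (p : PySem.Dict String Int × Int) t =>
      if t = "*" ∧ p.2 < skip then (p.1, p.2 + 1)
      else (p.1.insert t (p.1.getD t 0 + 1), p.2))
    (PySem.Dict.empty, 0)
  let kept := extra - (skip - st.2)
  let counts := if kept > 0 then st.1.insert "*" (st.1.getD "*" 0 + kept) else st.1
  counts.items

def free_site_regulator_for_mkm_py_alt (left : List String) (right : List String) (ads_info : List (String × Int)) : (List (String × Int)) × (List (String × Int)) :=
  let ads := (PySem.Dict.ofList ads_info).insert "*" 1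
  let lift_sites := ((left.filter (fun t => PySem.Str.endswith t "*")).map (fun t => ads.getD t 0)).sum
  let right_sites := ((right.filter (fun t => PySem.Str.endswith t "*")).map (fun t => ads.getD t 0)).sum
  let surplus := right_sites - lift_sites
  let left_extra := max surplus 0
  let right_extra := max (-surplus) 0
  let removals := min ((left.count "*" : Int) + left_extra) ((right.count "*" : Int) + right_extra)
  (pvTallyB left left_extra removals, pvTallyB right right_extra removals)

-- ===== PRECONDITION & SPEC =====
-- Pre_ excludes exactly the inputs on which Python A raises KeyError: a token ending in "*",
-- other than "*" itself, that is not a key of ads_info.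
def Pre_free_site_regulator_for_mkm_py (left : List String) (right : List String) (ads_info : List (String × Int)) : Prop :=
  ∀ t ∈ left ++ right, PySem.Str.endswith t "*" = true → (t = "*" ∨ t ∈ ads_info.map Prod.fst)
instance (left : List String) (right : List String) (ads_info : List (String × Int)) : Decidable (Pre_free_site_regulator_for_mkm_py left right ads_info) := by unfold Pre_free_site_regulator_for_mkm_py; infer_instance

def pvWitness_free_site_regulator_for_mkm_py : List String × List String × (List (String × Int)) :=
  (["A*", "CO"], ["*", "A*"], [("A*", 2)])

def Spec_free_site_regulator_for_mkm_py (left : List String) (right : List String) (ads_info : List (String × Int)) (out : (List (String × Int)) × (List (String × Int))) : Prop := out = free_site_regulator_for_mkm_py_alt left right ads_info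
instance (left : List String) (right : List String) (ads_info : List (String × Int)) (out : (List (String × Int)) × (List (String × Int))) : Decidable (Spec_free_site_regulator_for_mkm_py left right ads_info out) := by unfold Spec_free_site_regulator_for_mkm_py; infer_instance

-- ===== CLAIM (what is proved, stated in full; the proofs are below) =====
def Claim_equal_free_site_regulator_for_mkm_py : Prop := ∀ (left : List String) (right : List String) (ads_info : List (String × Int)), Dom_free_site_regulator_for_mkm_py left right ads_info → Pre_free_site_regulator_for_mkm_py left right ads_info → Spec_free_site_regulator_for_mkm_py left right ads_info (free_site_regulator_for_mkm_py left right ads_info)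

-- ===== LEMMAS AND PROOFS =====

-- remove the first k occurrences of "*"
def pvRemoveStars : Nat → List String → List String
  | 0, l => l
  | _ + 1, [] => []
  | k + 1, x :: xs => if x = "*" then pvRemoveStars k xs else x :: pvRemoveStars (k + 1) xs

theorem pvRemoveStars_nil (k : Nat) : pvRemoveStars k [] = [] := by
  cases k <;> rfl

theorem pvRemoveStars_cons_ne (k : Nat) (x : String) (xs : List String) (hx : x ≠ "*") :
    pvRemoveStars k (x :: xs) = x :: pvRemoveStars k xs := by
  cases k with
  | zero => simp [pvRemoveStars]
  | succ k => simp [pvRemoveStars, hx]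

theorem pvRemoveStars_succ_erase (k : Nat) (l : List String) (h : "*" ∈ l) :
    pvRemoveStars (k + 1) l = pvRemoveStars k (l.erase "*") := by
  induction l with
  | nil => simp at h
  | cons x xs ih =>
    by_cases hx : x = "*"
    · subst hx
      simp [pvRemoveStars]
    · have hmem : "*" ∈ xs := by simpa [hx, Ne.symm hx] using h
      rw [List.erase_cons_tail (by simpa using hx)]
      have h1 : pvRemoveStars (k + 1) (x :: xs) = x :: pvRemoveStars (k + 1) xs := by
        simp [pvRemoveStars, hx]
      rw [h1, pvRemoveStars_cons_ne _ _ _ hx, ih hmem]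

theorem pvStarLoopA_eq (l r : List String) :
    pvStarLoopA l r = (pvRemoveStars (min (l.count "*") (r.count "*")) l,
                       pvRemoveStars (min (l.count "*") (r.count "*")) r) := by
  induction l, r using pvStarLoopA.induct with
  | case1 l r h ih =>
    rw [pvStarLoopA, dif_pos h]
    rw [PySem.List.remove?_eq_some_erase l "*" h.1, PySem.List.remove?_eq_some_erase r "*" h.2] at ih ⊢
    simp only [Option.getD_some] at ih ⊢
    have hcl : 0 < l.count "*" := List.count_pos_iff.mpr h.1
    have hcr : 0 < r.count "*" := List.count_pos_iff.mpr h.2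
    have hel : (l.erase "*").count "*" = l.count "*" - 1 := List.count_erase_self ..
    have her : (r.erase "*").count "*" = r.count "*" - 1 := List.count_erase_self ..
    rw [ih, hel, her]
    have hmin : min (l.count "*") (r.count "*") = min (l.count "*" - 1) (r.count "*" - 1) + 1 := by omega
    rw [hmin, pvRemoveStars_succ_erase _ _ h.1, pvRemoveStars_succ_erase _ _ h.2]
  | case2 l r h =>
    rw [pvStarLoopA, dif_neg h]
    have : min (l.count "*") (r.count "*") = 0 := by
      rcases not_and_or.mp h with h1 | h1 <;> simp [List.count_eq_zero.mpr h1]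
    rw [this]
    simp [pvRemoveStars]

theorem pvRemoveStars_replicate (k e : Nat) :
    pvRemoveStars k (List.replicate e "*") = List.replicate (e - k) "*" := by
  induction k generalizing e with
  | zero => simp [pvRemoveStars]
  | succ k ih =>
    cases e with
    | zero => simp [pvRemoveStars_nil]
    | succ e => simpa [List.replicate_succ, pvRemoveStars] using ih e

theorem pvRemoveStars_append_replicate (k e : Nat) (l : List String) :
    pvRemoveStars k (l ++ List.replicate e "*") =
      pvRemoveStars k l ++ List.replicate (e - (k - l.count "*")) "*" := by
  induction l generalizing k with
  | nil => simp [pvRemoveStars_nil, pvRemoveStars_replicate]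
  | cons x xs ih =>
    by_cases hx : x = "*"
    · subst hx
      cases k with
      | zero => simp [pvRemoveStars]
      | succ k => simpa [pvRemoveStars, List.count_cons] using ih k
    · rw [List.cons_append, pvRemoveStars_cons_ne _ _ _ hx, pvRemoveStars_cons_ne _ _ _ hx]
      simp [ih k, hx]

-- the single counting pass of B, characterised
theorem pvTallyB_fold (K : Int) (l : List String) (d : PySem.Dict String Int) (s : Int)
    (hs : 0 ≤ s) (hK : s ≤ K) :
    l.foldl
      (fun (p : PySem.Dict String Int × Int) t =>
        if t = "*" ∧ p.2 < K then (p.1, p.2 + 1)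
        else (p.1.insert t (p.1.getD t 0 + 1), p.2)) (d, s)
    = ((pvRemoveStars (K - s).toNat l).foldl (fun d x => d.insert x (d.getD x 0 + 1)) d,
       s + min (l.count "*" : Int) (K - s)) := by
  induction l generalizing d s with
  | nil =>
    have h0 : pvRemoveStars (K - s).toNat ([] : List String) = [] := by
      cases h : (K - s).toNat <;> simp [pvRemoveStars]
    rw [List.foldl_nil, h0, List.foldl_nil]
    refine Prod.ext rfl ?_
    simp
    omega
  | cons x xs ih =>
    by_cases hx : x = "*"
    · subst hx
      by_cases hsK : s < K
      · rw [List.foldl_cons, if_pos ⟨rfl, hsK⟩]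
        rw [ih d (s + 1) (by omega) (by omega)]
        have hj : (K - s).toNat = (K - (s + 1)).toNat + 1 := by omega
        have hrs : pvRemoveStars ((K - (s+1)).toNat + 1) ("*" :: xs) = pvRemoveStars ((K - (s+1)).toNat) xs := by
          simp [pvRemoveStars]
        rw [hj, hrs]
        refine Prod.ext rfl ?_
        simp only [List.count_cons_self]
        push_cast
        omega
      · rw [List.foldl_cons, if_neg (fun hc => hsK hc.2)]
        rw [ih _ s hs hK]
        have h0 : (K - s).toNat = 0 := by omega
        rw [h0]
        refine Prod.ext ?_ ?_
        · simp [pvRemoveStars]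
        · simp only [List.count_cons_self]
          omega
    · rw [List.foldl_cons, if_neg (by simp [hx])]
      rw [ih _ s hs hK]
      rw [pvRemoveStars_cons_ne _ _ _ hx]
      refine Prod.ext rfl ?_
      simp [List.count_cons_of_ne (by simpa using hx)]

-- Dict facts used to fold the surviving padding count into the counter
theorem pvDict_insert_insert {κ ν : Type} [BEq κ] [LawfulBEq κ] (d : PySem.Dict κ ν) (k : κ) (v w : ν) :
    (d.insert k v).insert k w = d.insert k w := by
  have hany : ∀ (v' : ν), (List.map (fun p => if (p.1 == k) = true then (k, v') else p) d.items).any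
      (fun p => p.1 == k) = d.items.any (fun p => p.1 == k) := by
    intro v'
    induction d.items with
    | nil => simp
    | cons p ps ih =>
      by_cases hp : (p.1 == k) = true
      · simp [hp]
      · simp [hp, ih]
  by_cases hc : d.items.any (fun p => p.1 == k) = true
  · simp only [PySem.Dict.insert, PySem.Dict.contains, hc, if_true, hany]
    congr 1
    rw [List.map_map]
    apply List.map_congr_left
    intro p _
    by_cases h : (p.1 == k) = true <;> simp [h]
  · have h3 : List.map (fun p => if (p.1 == k) = true then (k, w) else p) d.items = d.items := by
      conv_rhs => rw [← List.map_id d.items]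
      apply List.map_congr_left
      intro p hp
      have := List.any_eq_false.mp (Bool.eq_false_iff.mpr hc) p hp
      simp [this]
    simp [PySem.Dict.insert, PySem.Dict.contains, hc, h3]

theorem pvCounter_append_replicate (ys : List String) (n : Nat) (hn : 0 < n) :
    PySem.Dict.counter (ys ++ List.replicate n "*") =
      (PySem.Dict.counter ys).insert "*" ((PySem.Dict.counter ys).getD "*" 0 + n) := by
  induction n with
  | zero => omega
  | succ n ih =>
    rw [List.replicate_succ' , ← List.append_assoc, PySem.Dict.counter_append_singleton]
    cases Nat.eq_zero_or_pos n with
    | inl h0 =>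
      subst h0
      simp [PySem.Dict.modify]
    | inr hpos =>
      rw [ih hpos]
      simp only [PySem.Dict.modify]
      rw [PySem.Dict.getD_insert]
      rw [pvDict_insert_insert]
      simp
      ring_nf

-- one side of the result: A's counter-after-removals equals B's single pass
theorem pvSide (l : List String) (e K : Int) (he : 0 ≤ e) (hK0 : 0 ≤ K)
    (hKle : K ≤ (l.count "*" : Int) + e) :
    (PySem.Dict.counter (pvRemoveStars K.toNat (l ++ List.replicate e.toNat "*"))).items
      = pvTallyB l e K := by
  unfold pvTallyB
  rw [pvTallyB_fold K l PySem.Dict.empty 0 le_rfl hK0]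
  simp only [sub_zero, zero_add]
  rw [PySem.Dict.foldl_insert_getD_add_one_eq_counter]
  rw [pvRemoveStars_append_replicate]
  by_cases hkept : 0 < e - (K - min (l.count "*" : Int) K)
  · rw [pvCounter_append_replicate _ _ (by omega : 0 < e.toNat - (K.toNat - l.count "*"))]
    rw [if_pos hkept]
    congr 2
    omega
  · have h0 : e.toNat - (K.toNat - l.count "*") = 0 := by omega
    rw [h0, if_neg hkept]
    simp

theorem pvMainCore (l r : List String) (el er : Int) (hel : 0 ≤ el) (her : 0 ≤ er) :
    ((PySem.Dict.counter (pvStarLoopA (l ++ List.replicate el.toNat "*") (r ++ List.replicate er.toNat "*")).1).items,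
     (PySem.Dict.counter (pvStarLoopA (l ++ List.replicate el.toNat "*") (r ++ List.replicate er.toNat "*")).2).items)
    = (pvTallyB l el (min ((l.count "*" : Int) + el) ((r.count "*" : Int) + er)),
       pvTallyB r er (min ((l.count "*" : Int) + el) ((r.count "*" : Int) + er))) := by
  rw [pvStarLoopA_eq]
  have hcl : (l ++ List.replicate el.toNat "*").count "*" = l.count "*" + el.toNat := by
    simp
  have hcr : (r ++ List.replicate er.toNat "*").count "*" = r.count "*" + er.toNat := by
    simp
  rw [hcl, hcr]
  have hKnat : min (l.count "*" + el.toNat) (r.count "*" + er.toNat)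
      = (min ((l.count "*" : Int) + el) ((r.count "*" : Int) + er)).toNat := by
    omega
  rw [hKnat]
  refine Prod.ext ?_ ?_
  · exact pvSide l el _ hel (by omega) (by omega)
  · exact pvSide r er _ her (by omega) (by omega)

theorem pvMain (l r : List String) (S : Int) :
    ((PySem.Dict.counter (pvStarLoopA
        (if S < 0 then l else if S > 0 then l ++ PySem.List.pyRepeat ["*"] S else l)
        (if S < 0 then r ++ PySem.List.pyRepeat ["*"] (-S) else r)).1).items,
     (PySem.Dict.counter (pvStarLoopA
        (if S < 0 then l else if S > 0 then l ++ PySem.List.pyRepeat ["*"] S else l)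
        (if S < 0 then r ++ PySem.List.pyRepeat ["*"] (-S) else r)).2).items)
    = (pvTallyB l (max S 0) (min ((l.count "*" : Int) + max S 0) ((r.count "*" : Int) + max (-S) 0)),
       pvTallyB r (max (-S) 0) (min ((l.count "*" : Int) + max S 0) ((r.count "*" : Int) + max (-S) 0))) := by
  rcases lt_trichotomy S 0 with hS | hS | hS
  · have h1 : max S 0 = 0 := by omega
    have h2 : max (-S) 0 = -S := by omega
    have := pvMainCore l r 0 (-S) le_rfl (by omega)
    simp only [if_pos hS, PySem.List.pyRepeat_singleton, h1, h2]
    simpa using this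
  · subst hS
    have := pvMainCore l r 0 0 le_rfl le_rfl
    simp only [lt_irrefl, if_false]
    simpa using this
  · have h1 : max S 0 = S := by omega
    have h2 : max (-S) 0 = 0 := by omega
    have := pvMainCore l r S 0 (by omega) le_rfl
    simp only [if_neg (by omega : ¬ S < 0), if_pos hS, PySem.List.pyRepeat_singleton, h1, h2]
    simpa using this

-- ===== VERDICT (by name: the statement is the Claim_ definition above) =====
theorem free_site_regulator_for_mkm_py_spec : Claim_equal_free_site_regulator_for_mkm_py := by
  intro left right ads_info _ _
  unfold Spec_free_site_regulator_for_mkm_py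
  unfold free_site_regulator_for_mkm_py free_site_regulator_for_mkm_py_alt
  exact pvMain left right _
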